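-- pv_equiv track=rewrite | github.com/BenWarwick-Champion/adventofcode | docking_data.py | unpack_mask
-- ===== SOURCE A (Python) =====
-- def unpack_mask(mask):
--     if not mask:
--         yield ''
--         return
--     for m in unpack_mask(mask[1:]):
--         if mask[0] == '0':
--             yield 'X' + m
--         elif mask[0] == '1':
--             yield '1' + m
--         elif mask[0] == 'X':
--             yield '0' + m
--             yield '1' + m
-- ===== SOURCE B (Python) =====
-- def unpack_mask(mask):
--     # Iterative right-to-left fold instead of recursion: build all suffix
--     # expansions, prepending each character's options (outer loop over
--     # existing results, inner over options, matching A's enumeration order).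
--     results = ['']
--     for c in reversed(mask):
--         if c == '0':
--             opts = ['X']
--         elif c == '1':
--             opts = ['1']
--         elif c == 'X':
--             opts = ['0', '1']
--         else:
--             opts = []
--         results = [o + r for r in results for o in opts]
--     yield from results
-- ===== Notes on version B (the rewrite author's own statement) =====
-- stated objective: idiomatic
-- what changed: Replaced A's recursive generator over the mask's tail with an iterative right-to-left fold that prepends each character's option list to the accumulated suffix expansions, removing the per-character nested-generator overhead.
import Mathlib
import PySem

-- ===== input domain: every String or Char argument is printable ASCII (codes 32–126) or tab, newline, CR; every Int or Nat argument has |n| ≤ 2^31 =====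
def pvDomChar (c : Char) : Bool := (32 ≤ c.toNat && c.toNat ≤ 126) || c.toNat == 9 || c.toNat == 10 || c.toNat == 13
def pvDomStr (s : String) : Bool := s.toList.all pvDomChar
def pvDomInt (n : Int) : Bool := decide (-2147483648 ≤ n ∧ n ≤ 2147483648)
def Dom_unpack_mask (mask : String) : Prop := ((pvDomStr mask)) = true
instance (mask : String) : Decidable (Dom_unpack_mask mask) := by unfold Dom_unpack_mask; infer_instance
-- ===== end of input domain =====

-- B replaces A's recursive generator with an iterative right-to-left fold (same cost, different decomposition).


-- ===== PORT A =====
-- recursion on the char list; strings handled as List Char (exact for building 'c' + m)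
def unpackA : List Char → List (List Char)
  | [] => [[]]
  | c :: rest =>
    (unpackA rest).flatMap (fun m =>
      if c = '0' then ['X' :: m]
      else if c = '1' then ['1' :: m]
      else if c = 'X' then ['0' :: m, '1' :: m]
      else [])

def unpack_mask (mask : String) : List String :=
  (unpackA mask.toList).map (fun l => String.mk l)

-- ===== PORT B =====
def optsB (c : Char) : List (List Char) :=
  if c = '0' then [['X']]
  else if c = '1' then [['1']]
  else if c = 'X' then [['0'], ['1']]
  else []

def unpack_mask_alt (mask : String) : List String :=
  ((mask.toList.reverse).foldl
      (fun results c => results.flatMap (fun r => (optsB c).map (fun o => o ++ r)))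
      [[]]).map (fun l => String.mk l)

-- ===== PRECONDITION & SPEC =====
def Spec_unpack_mask (mask : String) (out : List String) : Prop := out = unpack_mask_alt mask
instance (mask : String) (out : List String) : Decidable (Spec_unpack_mask mask out) := by unfold Spec_unpack_mask; infer_instance

-- ===== CLAIM (what is proved, stated in full; the proofs are below) =====
def Claim_equal_unpack_mask : Prop := ∀ (mask : String), Dom_unpack_mask mask → Spec_unpack_mask mask (unpack_mask mask)

-- ===== LEMMAS AND PROOFS =====
theorem unpackA_eq_fold (l : List Char) :
    unpackA l =
      l.reverse.foldl
        (fun results c => results.flatMap (fun r => (optsB c).map (fun o => o ++ r)))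
        [[]] := by
  induction l with
  | nil => rfl
  | cons c rest ih =>
    simp only [List.reverse_cons, List.foldl_append, List.foldl_cons, List.foldl_nil, ← ih]
    simp only [unpackA, optsB]
    by_cases h0 : c = '0' <;> by_cases h1 : c = '1' <;> by_cases hx : c = 'X' <;>
      simp [h0, h1, hx, List.flatMap]

-- ===== VERDICT (by name: the statement is the Claim_ definition above) =====
theorem unpack_mask_spec : Claim_equal_unpack_mask := by
  intro mask _
  unfold Spec_unpack_mask unpack_mask unpack_mask_alt
  rw [unpackA_eq_fold]
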